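-- pv_equiv track=rewrite | github.com/Ayushman125/Adaptive-Neuro-Symbolic-Concept-Learning-under-Noisy-Perception | evaluation/reporting.py | convergence_step
-- ===== SOURCE A (Python) =====
-- def convergence_step(top_theories, window=3):
--     if len(top_theories) < window:
--         return None
--     for index in range(0, len(top_theories) - window + 1):
--         segment = top_theories[index:index + window]
--         head = segment[0]
--         if head and all(theory == head for theory in segment):
--             return index + window
--     return None
-- ===== SOURCE B (Python) =====
-- def convergence_step(top_theories, window=3):
--     # Single pass: track the length of the current run of equal, truthy elements.
--     if len(top_theories) < window:
--         return None
--     run = 0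
--     prev = None
--     i = 0
--     for t in top_theories:
--         if t and t == prev:
--             run += 1
--         elif t:
--             run = 1
--         else:
--             run = 0
--         if run >= window:
--             return i + 1
--         prev = t
--         i += 1
--     return None
-- ===== Notes on version B (the rewrite author's own statement) =====
-- stated objective: faster
-- what changed: Replaced the scan over all window start positions (each re-checking a window-sized slice) by a single left-to-right pass that maintains the run length of equal consecutive truthy elements and returns at the first index where the run reaches the window size.
-- outside the precondition, e.g. on convergence_step(['9 ', '', 'b 1z'], -2): A returns -2, B returns 1; on convergence_step(['a'], 0): A raises IndexError, B returns 1
import Mathlib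
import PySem

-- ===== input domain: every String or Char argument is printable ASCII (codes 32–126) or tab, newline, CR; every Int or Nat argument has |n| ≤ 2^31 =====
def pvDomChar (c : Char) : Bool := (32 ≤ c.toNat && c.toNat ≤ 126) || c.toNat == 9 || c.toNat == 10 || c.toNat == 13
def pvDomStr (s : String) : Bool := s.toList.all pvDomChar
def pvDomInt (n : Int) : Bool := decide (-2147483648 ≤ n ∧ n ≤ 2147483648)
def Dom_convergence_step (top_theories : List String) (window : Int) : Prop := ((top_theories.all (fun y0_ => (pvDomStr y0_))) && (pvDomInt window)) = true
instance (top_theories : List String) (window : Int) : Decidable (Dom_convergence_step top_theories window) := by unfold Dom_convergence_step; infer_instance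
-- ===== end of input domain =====

-- B replaces A's scan over all window start positions (each re-checking a whole slice)
-- by a single pass maintaining the run length of equal consecutive truthy elements.

-- ===== PORT A =====
-- A's 'for index in range(...)' loop; the 'none' of the pyGet? branch is Python's IndexError
-- (segment[0] of an empty slice, reachable only for window ≤ 0, which Pre_ excludes)
def convA_loop (top_theories : List String) (window : Int) : List Int → Option Int
  | [] => none
  | index :: rest =>
    let segment := PySem.List.slice top_theories (some index) (some (index + window))
    match PySem.List.pyGet? segment 0 with
    | none => none
    | some head =>
      if head != "" && segment.all (fun theory => theory == head) then some (index + window)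
      else convA_loop top_theories window rest

def convergence_step (top_theories : List String) (window : Int) : Option Int :=
  if (top_theories.length : Int) < window then none
  else convA_loop top_theories window
    (PySem.List.pyRange 0 ((top_theories.length : Int) - window + 1) 1)

-- ===== PORT B =====
-- B's 'for t in top_theories' loop with its state (run, prev, i)
def convB_loop (window : Int) : List String → Int → Option String → Int → Option Int
  | [], _, _, _ => none
  | t :: ts, run, prev, i =>
    let run' := if t != "" && prev == some t then run + 1 else if t != "" then 1 else 0
    if window ≤ run' then some (i + 1)
    else convB_loop window ts run' (some t) (i + 1)

def convergence_step_alt (top_theories : List String) (window : Int) : Option Int :=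
  if (top_theories.length : Int) < window then none
  else convB_loop window top_theories 0 none 0

-- ===== PRECONDITION & SPEC =====
-- Pre_ excludes non-positive windows, a corner outside the function's purpose where A's behaviour
-- is an accident of Python slicing: A either raises IndexError (segment[0] of an empty slice) or,
-- when the clamped negative slice l[i:i+window] happens to be uniform, returns the meaningless
-- value index+window (e.g. -2); B returns its own natural value there.
def Pre_convergence_step (top_theories : List String) (window : Int) : Prop := 1 ≤ window
instance (top_theories : List String) (window : Int) : Decidable (Pre_convergence_step top_theories window) := by unfold Pre_convergence_step; infer_instance

def pvWitness_convergence_step : List String × Int := (["a", "a", "a", "b"], 3)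

def Spec_convergence_step (top_theories : List String) (window : Int) (out : Option Int) : Prop := out = convergence_step_alt top_theories window
instance (top_theories : List String) (window : Int) (out : Option Int) : Decidable (Spec_convergence_step top_theories window out) := by unfold Spec_convergence_step; infer_instance

-- ===== CLAIM (what is proved, stated in full; the proofs are below) =====
def Claim_equal_convergence_step : Prop := ∀ (top_theories : List String) (window : Int), Dom_convergence_step top_theories window → Pre_convergence_step top_theories window → Spec_convergence_step top_theories window (convergence_step top_theories window)

-- ===== LEMMAS AND PROOFS =====

-- reference: position of the first uniform truthy window of length k, by structural recursion
def fgA (k : Nat) : List String → Option Nat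
  | [] => none
  | x :: xs =>
    if x ≠ "" ∧ (x :: xs).take k = List.replicate k x ∧ k ≤ (x :: xs).length then some 0
    else (fgA k xs).map (· + 1)

-- Nat-level core of B's loop (run length r, previous element p); 1-based offset of the first hit
def Bcore (k : Nat) : List String → Nat → String → Option Nat
  | [], _, _ => none
  | t :: ts, r, p =>
    let r' := if t ≠ "" ∧ t = p then r + 1 else if t ≠ "" then 1 else 0
    if k ≤ r' then some 1 else (Bcore k ts r' t).map (· + 1)

theorem fgA_short {k : Nat} : ∀ {l : List String}, l.length < k → fgA k l = none := by
  intro l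
  induction l with
  | nil => intro _; rfl
  | cons x xs ih =>
    intro h
    rw [fgA]
    rw [if_neg (by rintro ⟨_,_,hlen⟩; simp only [List.length_cons] at hlen h; omega)]
    rw [ih (by simp only [List.length_cons] at h; omega)]
    rfl

theorem fgA_skip {k : Nat} (t : String) (rest : List String) :
    ∀ (r : Nat) (p : String), r < k → (p = "" ∨ t ≠ p) →
    fgA k (List.replicate r p ++ t :: rest) = (fgA k (t :: rest)).map (· + r) := by
  intro r
  induction r with
  | zero => intro p _ _; simp
  | succ j ih =>
    intro p hr hp
    rw [List.replicate_succ, List.cons_append, fgA]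
    rw [if_neg ?_]
    · rw [ih p (by omega) hp]
      cases fgA k (t :: rest) <;> simp
      omega
    · rintro ⟨hpne, htake, hlen⟩
      -- position j+1 of the take k is t (or the element after replicate j p), contradicting replicate
      have hj1 : j + 1 < k := hr
      have : (List.replicate j p ++ t :: rest)[j]? = some t := by
        rw [List.getElem?_append_right (by simp)]
        simp
      have h2 : ((p :: (List.replicate j p ++ t :: rest)).take k)[j+1]? = some t := by
        rw [List.getElem?_take_of_lt hj1]
        simp
      rw [htake] at h2
      rw [List.getElem?_replicate] at h2
      rcases hp with hp | hp
      · exact hpne hp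
      · simp [hj1] at h2; exact hp h2.symm

theorem Bcore_fgA {k : Nat} (hk : 0 < k) :
    ∀ (l : List String) (r : Nat) (p : String), r < k → (r = 0 ∨ p ≠ "") →
    Bcore k l r p = (fgA k (List.replicate r p ++ l)).map (fun s => s + (k - r)) := by
  intro l
  induction l with
  | nil =>
    intro r p hr _
    rw [Bcore, fgA_short (by simp; omega)]
    rfl
  | cons t ts ih =>
    intro r p hr hp
    rw [Bcore]
    by_cases h1 : t ≠ "" ∧ t = p
    · -- run extends: r' = r + 1
      have hrep : List.replicate r p ++ t :: ts = List.replicate (r + 1) t ++ ts := by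
        rw [h1.2, List.replicate_succ', List.append_assoc, List.singleton_append]
      rw [if_pos h1]
      by_cases h2 : k ≤ r + 1
      · have hkr : k = r + 1 := by omega
        rw [if_pos h2, hrep, hkr]
        have hc : List.replicate (r + 1) t ++ ts = t :: (List.replicate r t ++ ts) := by
          simp [List.replicate_succ]
        rw [hc, fgA, if_pos ?_]
        · simp
        · refine ⟨h1.1, ?_, by simp⟩
          rw [← hc]
          rw [List.take_append_of_le_length (by simp)]
          simp
      · rw [if_neg h2, ih (r + 1) t (by omega) (Or.inr h1.1), hrep]
        cases fgA k (List.replicate (r + 1) t ++ ts) <;> simp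
        omega
    · -- run resets
      rw [if_neg h1]
      by_cases ht : t = ""
      · -- r' = 0
        rw [if_neg (show ¬ t ≠ "" by simp [ht]), if_neg (show ¬ k ≤ 0 by omega),
          ih 0 t hk (Or.inl rfl)]
        have hfg : fgA k (List.replicate r p ++ t :: ts) = (fgA k ts).map (fun s => s + 1 + r) := by
          rcases hp with h0 | hpne
          · subst h0
            rw [List.replicate, List.nil_append, fgA, if_neg (by simp [ht])]
          · rw [fgA_skip t ts r p hr (Or.inr (fun h => h1 ⟨fun he => hpne (h ▸ he), h⟩)), fgA,
              if_neg (by simp [ht])]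
            cases fgA k ts <;> simp
        rw [hfg, List.replicate, List.nil_append]
        cases fgA k ts <;> simp
        omega
      · -- t ≠ "", t ≠ p : r' = 1
        have htp : t ≠ p := fun h => h1 ⟨ht, h⟩
        rw [if_pos ht]
        have hfg : fgA k (List.replicate r p ++ t :: ts) = (fgA k (t :: ts)).map (fun s => s + r) := by
          rcases hp with h0 | hpne
          · subst h0; simp
          · exact fgA_skip t ts r p hr (Or.inr htp)
        by_cases h2 : k ≤ 1
        · have hk1 : k = 1 := by omega
          have hr0 : r = 0 := by omega
          subst hr0
          rw [if_pos h2, List.replicate, List.nil_append, fgA, if_pos ?_]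
          · simp [hk1]
          · exact ⟨ht, by simp [hk1], by simp; omega⟩
        · rw [if_neg h2, ih 1 t (by omega) (Or.inr ht), hfg]
          have hone : List.replicate 1 t ++ ts = t :: ts := by simp [List.replicate]
          rw [hone]
          cases fgA k (t :: ts) <;> simp
          omega

theorem convA_loop_fgA (tt : List String) (w : Int) (hw : 1 ≤ w) :
    ∀ (m d : Nat), d + m = tt.length + 1 - w.toNat → w.toNat ≤ tt.length →
    convA_loop tt w ((List.range m).map (fun (j : Nat) => (d : Int) + j)) =
      (fgA w.toNat (tt.drop d)).map (fun s => ((d + s : Nat) : Int) + w) := by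
  intro m
  induction m with
  | zero =>
    intro d hd hk
    rw [fgA_short (by simp; omega)]
    rfl
  | succ m ih =>
    intro d hd hk
    have hwk : ((w.toNat : Nat) : Int) = w := Int.toNat_of_nonneg (by omega)
    rw [List.range_succ_eq_map, List.map_cons, convA_loop]
    have hmap : ((List.range m).map Nat.succ).map (fun j => (d : Int) + ↑j) =
        (List.range m).map (fun (j : Nat) => ((d + 1 : Nat) : Int) + (j : Int)) := by
      rw [List.map_map]
      apply List.map_congr_left
      intro a _
      simp [Nat.succ_eq_add_one]
      ring
    have hslice : PySem.List.slice tt (some ((d : Nat) : Int)) (some ((d : Int) + w)) =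
        (tt.drop d).take w.toNat := by
      rw [show (d : Int) + w = ((d : Nat) : Int) + ((w.toNat : Nat) : Int) by omega]
      exact PySem.List.slice_natCast_add tt d w.toNat
    have hlen : w.toNat ≤ tt.length - d := by omega
    cases hD : tt.drop d with
    | nil =>
      exfalso
      have := congrArg List.length hD
      simp at this
      omega
    | cons x xs =>
      have hlxs : w.toNat ≤ xs.length + 1 := by
        have := congrArg List.length hD
        simp at this
        omega
      simp only [Nat.cast_zero, add_zero]
      rw [hslice, hD, hmap]
      have hget : PySem.List.pyGet? ((x :: xs).take w.toNat) 0 = some x := by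
        rw [PySem.List.pyGet?_zero]
        obtain ⟨k', hk'⟩ : ∃ k', w.toNat = k' + 1 := ⟨w.toNat - 1, by omega⟩
        rw [hk', List.take_succ_cons]
        rfl
      rw [hget]
      dsimp only
      have hcond : (x != "" && ((x :: xs).take w.toNat).all (fun th => th == x)) = true ↔
          (x ≠ "" ∧ (x :: xs).take w.toNat = List.replicate w.toNat x ∧ w.toNat ≤ (x :: xs).length) := by
        simp only [Bool.and_eq_true, bne_iff_ne, ne_eq, List.all_eq_true, beq_iff_eq,
          List.eq_replicate_iff, List.length_take, List.length_cons]
        constructor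
        · rintro ⟨h1, h2⟩
          exact ⟨h1, ⟨by omega, h2⟩, by omega⟩
        · rintro ⟨h1, ⟨_, h2⟩, _⟩
          exact ⟨h1, h2⟩
      rw [fgA]
      by_cases hc : x ≠ "" ∧ (x :: xs).take w.toNat = List.replicate w.toNat x ∧ w.toNat ≤ (x :: xs).length
      · rw [if_pos (hcond.mpr hc), if_pos hc]
        simp
      · rw [if_neg (fun h => hc (hcond.mp h)), if_neg hc]
        rw [ih (d + 1) (by omega) hk]
        have hxs : List.drop (d + 1) tt = xs := by
          rw [← List.tail_drop, hD]
          rfl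
        rw [hxs]
        cases fgA w.toNat xs <;> simp
        ring

theorem convB_loop_Bcore {w : Int} (hw : 1 ≤ w) :
    ∀ (l : List String) (r : Nat) (prev : Option String) (i : Int),
    convB_loop w l (r : Int) prev i = (Bcore w.toNat l r (prev.getD "")).map (fun (j : Nat) => i + (j : Int)) := by
  intro l
  induction l with
  | nil => intro r prev i; rfl
  | cons t ts ih =>
    intro r prev i
    rw [convB_loop, Bcore]
    have hwk : ((w.toNat : Nat) : Int) = w := Int.toNat_of_nonneg (by omega)
    have hc : (t != "" && prev == some t) = true ↔ (t ≠ "" ∧ t = prev.getD "") := by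
      cases prev with
      | none => simp
      | some p =>
        simp only [Option.getD_some, Bool.and_eq_true, bne_iff_ne, ne_eq, beq_iff_eq, Option.some.injEq]
        exact and_congr Iff.rfl eq_comm
    by_cases h1 : t ≠ "" ∧ t = prev.getD ""
    · rw [if_pos (hc.mpr h1), if_pos h1]
      by_cases h2 : w.toNat ≤ r + 1
      · rw [if_pos (show w ≤ (r : Int) + 1 by omega), if_pos h2]
        simp
      · rw [if_neg (show ¬ w ≤ (r : Int) + 1 by omega), if_neg h2]
        rw [show (r : Int) + 1 = ((r + 1 : Nat) : Int) by push_cast; ring]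
        rw [ih (r + 1) (some t)]
        simp only [Option.getD_some]
        cases Bcore w.toNat ts (r + 1) t <;> simp
        ring
    · rw [if_neg (show ¬ ((t != "" && prev == some t) = true) from fun h => h1 (hc.mp h)),
        if_neg h1]
      by_cases ht : t = ""
      · rw [if_neg (show ¬ ((t != "") = true) by simp [ht]),
          if_neg (show ¬ t ≠ "" by simp [ht])]
        rw [if_neg (show ¬ w ≤ (0 : Int) by omega), if_neg (show ¬ w.toNat ≤ 0 by omega)]
        rw [show (0 : Int) = ((0 : Nat) : Int) by simp]
        rw [ih 0 (some t)]
        simp only [Option.getD_some]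
        cases Bcore w.toNat ts 0 t <;> simp
        ring
      · rw [if_pos (show (t != "") = true by simp [ht]), if_pos ht]
        by_cases h2 : w.toNat ≤ 1
        · rw [if_pos (show w ≤ (1 : Int) by omega), if_pos h2]
          simp
        · rw [if_neg (show ¬ w ≤ (1 : Int) by omega), if_neg h2]
          rw [show (1 : Int) = ((1 : Nat) : Int) by simp]
          rw [ih 1 (some t)]
          simp only [Option.getD_some]
          cases Bcore w.toNat ts 1 t <;> simp
          ring

-- ===== VERDICT (by name: the statement is the Claim_ definition above) =====
theorem convergence_step_spec : Claim_equal_convergence_step := by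
  intro tt w _ hw
  unfold Spec_convergence_step convergence_step convergence_step_alt
  have hw1 : (1 : Int) ≤ w := hw
  by_cases hlt : (tt.length : Int) < w
  · rw [if_pos hlt, if_pos hlt]
  · rw [if_neg hlt, if_neg hlt]
    have hwk : ((w.toNat : Nat) : Int) = w := Int.toNat_of_nonneg (by omega)
    have hk : w.toNat ≤ tt.length := by omega
    -- A side: the index loop computes fgA
    rw [PySem.List.pyRange_one]
    have hcast : (List.range ((tt.length : Int) - w + 1 - 0).toNat).map (fun (k : Nat) => (0 : Int) + (k : Int)) =
        (List.range (tt.length + 1 - w.toNat)).map (fun (j : Nat) => ((0 : Nat) : Int) + (j : Int)) := by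
      have : ((tt.length : Int) - w + 1 - 0).toNat = tt.length + 1 - w.toNat := by omega
      rw [this]
      simp
    rw [hcast, convA_loop_fgA tt w hw1 (tt.length + 1 - w.toNat) 0 (by omega) hk, List.drop_zero]
    -- B side: the run-length loop computes Bcore, which computes fgA
    rw [show (0 : Int) = ((0 : Nat) : Int) by simp]
    rw [convB_loop_Bcore hw1 tt 0 none]
    simp only [Option.getD_none]
    rw [Bcore_fgA (by omega) tt 0 "" (by omega) (Or.inl rfl), List.replicate, List.nil_append]
    cases fgA w.toNat tt <;> simp
    omega
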